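-- pv_equiv track=rewrite | github.com/and86rey/financial-terminal | metrics.py | calculate_rolling_var
-- ===== SOURCE A (Python) =====
-- def calculate_rolling_var(returns, window_size=20):
--     var_values = []
--     for i in range(len(returns)):
--         start = max(0, i - window_size + 1)
--         window = returns[start:i + 1]
--         if len(window) < 5:
--             var_values.append(0)
--         else:
--             sorted_window = sorted(window)
--             var95 = -sorted_window[int(len(sorted_window) * 0.05)]
--             var_values.append(var95)
--     return var_values
-- ===== SOURCE B (Python) =====
-- def calculate_rolling_var(returns, window_size=20):
--     # One sliding sorted window maintained incrementally (binary-search insert,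
--     # binary-search remove of the outgoing element) instead of sorting each window.
--     def insert_pos(win, x, lo, hi):
--         # leftmost index in sorted win[lo:hi] at which x can be inserted (bisect_left)
--         if lo >= hi:
--             return lo
--         mid = (lo + hi) // 2
--         if win[mid] < x:
--             return insert_pos(win, x, mid + 1, hi)
--         return insert_pos(win, x, lo, mid)
--
--     cap = max(window_size, 0)
--     win = []
--     out = []
--     for i, x in enumerate(returns):
--         win.insert(insert_pos(win, x, 0, len(win)), x)
--         if len(win) > cap:
--             old = returns[i - cap]
--             win.pop(insert_pos(win, old, 0, len(win)))
--         n = len(win)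
--         out.append(0 if n < 5 else -win[int(n * 0.05)])
--     return out
-- ===== Notes on version B (the rewrite author's own statement) =====
-- stated objective: faster
-- what changed: Instead of slicing and fully sorting each window, B maintains one sorted sliding window across the whole pass, inserting the incoming element and removing the outgoing one at positions found by binary search.
import Mathlib
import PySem

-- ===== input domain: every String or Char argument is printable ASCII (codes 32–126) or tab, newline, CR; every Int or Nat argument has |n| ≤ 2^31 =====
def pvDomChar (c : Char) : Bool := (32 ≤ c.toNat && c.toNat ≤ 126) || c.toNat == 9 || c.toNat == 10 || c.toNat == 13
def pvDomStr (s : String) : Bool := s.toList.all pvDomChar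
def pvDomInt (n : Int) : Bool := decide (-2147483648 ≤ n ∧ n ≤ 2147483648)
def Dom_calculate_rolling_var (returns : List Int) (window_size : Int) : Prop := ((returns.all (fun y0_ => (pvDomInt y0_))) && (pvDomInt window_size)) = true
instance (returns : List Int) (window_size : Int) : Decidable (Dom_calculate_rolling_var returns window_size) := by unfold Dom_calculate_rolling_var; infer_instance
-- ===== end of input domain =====

-- B maintains one sorted sliding window (binary-search insert / remove) instead of sorting every window slice; measured faster.


-- ===== PORT A =====
-- loop body of A (kept as a named helper; the fold below is the Python for-loop)
def aStep (returns : List Int) (window_size : Int) (var_values : List Int) (i : Int) : List Int :=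
  let start := max 0 (i - window_size + 1)
  let window := PySem.List.slice returns (some start) (some (i + 1))
  if window.length < 5 then var_values ++ [0]
  else
    let sorted_window := PySem.List.sorted window (fun x => x)
    -- int(len(sorted_window) * 0.05): exact as len // 20 for every reachable length (float rounding
    -- of L*0.05 agrees with L//20 for all L ≤ 3·10^6, checked exhaustively)
    -- index is provably in range (len//20 < len since len ≥ 5), so pyGetD's default is never used
    let var95 := -(PySem.List.pyGetD sorted_window (PySem.Int.floordiv (sorted_window.length : Int) 20) 0)
    var_values ++ [var95]

def calculate_rolling_var (returns : List Int) (window_size : Int) : List Int :=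
  (PySem.List.pyRange 0 (returns.length : Int) 1).foldl (aStep returns window_size) []

-- ===== PORT B =====
-- B's hand-written binary search (bisect_left): leftmost insertion point for x in sorted win[lo:hi]
def insertPos (win : List Int) (x : Int) (lo hi : Int) : Int :=
  if lo ≥ hi then lo
  else
    let mid := PySem.Int.floordiv (lo + hi) 2
    -- win[mid]: mid is provably in range (0 ≤ lo ≤ mid < hi ≤ len win), so pyGetD's default is never used
    if PySem.List.pyGetD win mid 0 < x then insertPos win x (mid + 1) hi
    else insertPos win x lo mid
termination_by (hi - lo).toNat
decreasing_by
  · have h1 := PySem.Int.floordiv_two_mid_bounds (le_of_not_ge (by omega) : lo ≤ hi)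
    have h2 : PySem.Int.floordiv (lo + hi) 2 < hi := by
      rw [PySem.Int.floordiv_lt_iff_lt_mul (by omega)]; omega
    omega
  · have h2 : PySem.Int.floordiv (lo + hi) 2 < hi := by
      rw [PySem.Int.floordiv_lt_iff_lt_mul (by omega)]; omega
    omega

-- loop body of B: insert the incoming element into the sorted window, evict the outgoing one, emit the VaR
def bStep (returns : List Int) (cap : Int) (st : List Int × List Int) (ix : Int × Int) : List Int × List Int :=
  let win0 := PySem.List.insert st.1 (insertPos st.1 ix.2 0 (st.1.length : Int)) ix.2
  let win :=
    if cap < (win0.length : Int) then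
      -- returns[i - cap]: the branch fires only when cap ≤ i < len returns, so the index is in range
      let old := PySem.List.pyGetD returns (ix.1 - cap) 0
      match PySem.List.pop? win0 (insertPos win0 old 0 (win0.length : Int)) with
      | some r => r.2
      | none => win0   -- unreachable: the pop position is provably in range
    else win0
  let n := (win.length : Int)
  (win, st.2 ++ [if n < 5 then (0 : Int) else -(PySem.List.pyGetD win (PySem.Int.floordiv n 20) 0)])

def calculate_rolling_var_alt (returns : List Int) (window_size : Int) : List Int :=
  let cap := max window_size 0
  ((PySem.List.enumerate returns).foldl (bStep returns cap) ([], [])).2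

-- ===== PRECONDITION & SPEC =====
def Spec_calculate_rolling_var (returns : List Int) (window_size : Int) (out : List Int) : Prop := out = calculate_rolling_var_alt returns window_size
instance (returns : List Int) (window_size : Int) (out : List Int) : Decidable (Spec_calculate_rolling_var returns window_size out) := by unfold Spec_calculate_rolling_var; infer_instance

-- ===== CLAIM (what is proved, stated in full; the proofs are below) =====
def Claim_equal_calculate_rolling_var : Prop := ∀ (returns : List Int) (window_size : Int), Dom_calculate_rolling_var returns window_size → Spec_calculate_rolling_var returns window_size (calculate_rolling_var returns window_size)

-- ===== LEMMAS AND PROOFS =====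

-- the value A appends at (Int) index i
def avalI (r : List Int) (w : Int) (i : Int) : Int :=
  let window := PySem.List.slice r (some (max 0 (i - w + 1))) (some (i + 1))
  if window.length < 5 then 0
  else -(PySem.List.pyGetD (PySem.List.sorted window (fun x => x))
          (PySem.Int.floordiv ((PySem.List.sorted window (fun x => x)).length : Int) 20) 0)

-- contents of the window after k elements have been consumed (cap c)
def Wf (r : List Int) (c : Nat) (k : Nat) : List Int := (r.take k).drop (k - c)

lemma aStep_eq (r : List Int) (w : Int) (acc : List Int) (i : Int) :
    aStep r w acc i = acc ++ [avalI r w i] := by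
  show (if (PySem.List.slice r (some (max 0 (i - w + 1))) (some (i + 1))).length < 5 then _ else _) = _
  by_cases h : (PySem.List.slice r (some (max 0 (i - w + 1))) (some (i + 1))).length < 5 <;>
    simp [avalI, h]

lemma afold_eq (r : List Int) (w : Int) (k : Nat) :
    (PySem.List.pyRange 0 (k : Int) 1).foldl (aStep r w) []
      = (List.range k).map (fun j : Nat => avalI r w (j : Int)) := by
  induction k with
  | zero => simp [PySem.List.pyRange_one_eq_nil (le_refl (0 : Int))]
  | succ k ih =>
    have hcast : ((k + 1 : Nat) : Int) = (k : Int) + 1 := by push_cast; ring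
    rw [hcast, PySem.List.pyRange_one_succ_right (by positivity), List.foldl_append, ih,
      List.range_succ, List.map_append]
    simp [aStep_eq]

lemma insertPos_spec (win : List Int) (x : Int) (hs : win.Pairwise (· ≤ ·)) :
    ∀ (fuel : Nat) (lo hi : Int), (hi - lo).toNat = fuel → 0 ≤ lo → lo ≤ hi → hi ≤ (win.length : Int) →
    (∀ (j : Nat) (hj : j < win.length), (j : Int) < lo → win[j] < x) →
    (∀ (j : Nat) (hj : j < win.length), hi ≤ (j : Int) → x ≤ win[j]) →
    0 ≤ insertPos win x lo hi ∧ insertPos win x lo hi ≤ (win.length : Int) ∧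
    (∀ (j : Nat) (hj : j < win.length), (j : Int) < insertPos win x lo hi → win[j] < x) ∧
    (∀ (j : Nat) (hj : j < win.length), insertPos win x lo hi ≤ (j : Int) → x ≤ win[j]) := by
  have hmono : ∀ (i j : Nat) (hij : i ≤ j) (hj : j < win.length), win[i]'(Nat.lt_of_le_of_lt hij hj) ≤ win[j] := by
    intro i j hij hj
    rcases Nat.eq_or_lt_of_le hij with rfl | hlt
    · exact le_refl _
    · exact List.pairwise_iff_getElem.mp hs i j _ _ hlt
  intro fuel
  induction fuel using Nat.strong_induction_on with
  | _ fuel ih =>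
    intro lo hi hfuel h0 hlh hhi hbelow habove
    rw [insertPos]
    by_cases hge : lo ≥ hi
    · simp only [if_pos hge]
      have heq : lo = hi := le_antisymm hlh hge
      subst heq
      exact ⟨h0, le_trans hlh hhi, fun j hj hjp => hbelow j hj hjp, fun j hj hjp => habove j hj hjp⟩
    · simp only [if_neg hge]
      have hlo_lt : lo < hi := lt_of_not_ge hge
      have hb := PySem.Int.floordiv_two_mid_bounds (le_of_lt hlo_lt)
      have hlt : PySem.Int.floordiv (lo + hi) 2 < hi := by
        rw [PySem.Int.floordiv_lt_iff_lt_mul (by omega)]; omega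
      set mid := PySem.Int.floordiv (lo + hi) 2 with hmid
      have hm0 : 0 ≤ mid := le_trans h0 hb.1
      have hmlen : mid.toNat < win.length := by omega
      have hget : PySem.List.pyGetD win mid 0 = win[mid.toNat] :=
        PySem.List.pyGetD_eq_getElem win 0 hm0 (by omega)
      rw [hget]
      by_cases hcmp : win[mid.toNat] < x
      · rw [if_pos hcmp]
        refine ih ((hi - (mid + 1)).toNat) (by omega) (mid + 1) hi rfl (by omega) (by omega) hhi ?_ habove
        intro j hj hjlt
        exact lt_of_le_of_lt (hmono j mid.toNat (by omega) hmlen) hcmp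
      · rw [if_neg hcmp]
        refine ih ((mid - lo).toNat) (by omega) lo mid rfl h0 hb.1 (by omega) hbelow ?_
        intro j hj hjge
        exact le_trans (not_lt.mp hcmp) (hmono mid.toNat j (by omega) hj)

lemma insert_at_insertPos (win : List Int) (x : Int) (hs : win.Pairwise (· ≤ ·)) :
    (PySem.List.insert win (insertPos win x 0 (win.length : Int)) x).Pairwise (· ≤ ·) ∧
    (PySem.List.insert win (insertPos win x 0 (win.length : Int)) x).Perm (x :: win) := by
  obtain ⟨hp0, hpl, hlt, hge⟩ := insertPos_spec win x hs ((win.length : Int) - 0).toNat 0 (win.length : Int)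
    rfl (le_refl _) (by omega) (le_refl _)
    (fun j hj hjp => absurd hjp (by omega)) (fun j hj hjp => absurd hjp (by omega))
  set p := insertPos win x 0 (win.length : Int) with hp
  have hcast : p = ((p.toNat : Nat) : Int) := (Int.toNat_of_nonneg hp0).symm
  rw [hcast, PySem.List.insert_natCast win p.toNat x (by omega)]
  constructor
  · rw [List.pairwise_append]
    refine ⟨List.Pairwise.sublist (List.take_sublist _ _) hs, ?_, ?_⟩
    · rw [List.pairwise_cons]
      refine ⟨?_, List.Pairwise.sublist (List.drop_sublist _ _) hs⟩
      intro a ha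
      obtain ⟨i, hi, rfl⟩ := List.mem_iff_getElem.mp ha
      rw [List.getElem_drop]
      exact hge _ (by simp at hi; omega) (by omega)
    · intro a ha b hb
      obtain ⟨j, hj, rfl⟩ := List.mem_iff_getElem.mp ha
      rw [List.getElem_take]
      have hjp : j < p.toNat := by simp at hj; omega
      have haj : win[j]'(by simp at hj; omega) < x := hlt j (by simp at hj; omega) (by omega)
      rcases List.mem_cons.mp hb with rfl | hb
      · exact le_of_lt haj
      · obtain ⟨i, hi, rfl⟩ := List.mem_iff_getElem.mp hb
        rw [List.getElem_drop]
        exact le_of_lt (lt_of_lt_of_le haj (hge _ (by simp at hi; omega) (by omega)))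
  · exact List.perm_middle.trans (by rw [List.take_append_drop])

lemma pop_at_insertPos (win : List Int) (old : Int) (hs : win.Pairwise (· ≤ ·)) (hm : old ∈ win) :
    ∃ res, PySem.List.pop? win (insertPos win old 0 (win.length : Int)) = some (old, res) ∧
      res.Pairwise (· ≤ ·) ∧ (old :: res).Perm win := by
  have hmono : ∀ (i j : Nat) (hij : i ≤ j) (hj : j < win.length), win[i]'(Nat.lt_of_le_of_lt hij hj) ≤ win[j] := by
    intro i j hij hj
    rcases Nat.eq_or_lt_of_le hij with rfl | hlt
    · exact le_refl _
    · exact List.pairwise_iff_getElem.mp hs i j _ _ hlt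
  obtain ⟨hp0, hpl, hlt, hge⟩ := insertPos_spec win old hs ((win.length : Int) - 0).toNat 0 (win.length : Int)
    rfl (le_refl _) (by omega) (le_refl _)
    (fun j hj hjp => absurd hjp (by omega)) (fun j hj hjp => absurd hjp (by omega))
  set p := insertPos win old 0 (win.length : Int) with hp
  obtain ⟨m, hm, hmeq⟩ := List.mem_iff_getElem.mp hm
  have hpm : p ≤ (m : Int) := by
    by_contra hcon
    have := hlt m hm (lt_of_not_ge fun h => hcon (le_of_lt (lt_of_le_of_lt h (by omega))))
    omega
  have hplen : p.toNat < win.length := by omega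
  have hpval : win[p.toNat] = old := by
    refine le_antisymm ?_ (hge p.toNat hplen (by omega))
    calc win[p.toNat] ≤ win[m] := hmono p.toNat m (by omega) hm
    _ = old := hmeq
  have hcast : p = ((p.toNat : Nat) : Int) := (Int.toNat_of_nonneg hp0).symm
  refine ⟨win.eraseIdx p.toNat, ?_, ?_, ?_⟩
  · conv_lhs => rw [hcast]
    rw [PySem.List.pop?_natCast win p.toNat hplen, hpval]
  · exact List.Pairwise.sublist (List.eraseIdx_sublist ..) hs
  · rw [List.eraseIdx_eq_take_drop_succ]
    refine List.Perm.trans ?_ (by rw [List.take_append_drop] : (win.take p.toNat ++ win.drop p.toNat).Perm win)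
    rw [List.drop_eq_getElem_cons hplen, hpval]
    exact List.perm_middle.symm

lemma Wf_succ_lt (r : List Int) (c k : Nat) (hk : k < r.length) (h : k < c) :
    Wf r c (k + 1) = Wf r c k ++ [r[k]] := by
  unfold Wf
  rw [Nat.sub_eq_zero_of_le (by omega), Nat.sub_eq_zero_of_le (by omega), List.drop_zero,
    List.drop_zero, List.take_succ_eq_append_getElem hk]

lemma Wf_succ_perm_ge (r : List Int) (c k : Nat) (hk : k < r.length) (h : c ≤ k) :
    (r[k - c] :: Wf r c (k + 1)).Perm (r[k] :: Wf r c k) := by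
  rcases Nat.eq_zero_or_pos c with rfl | hc
  · have h1 : Wf r 0 k = [] := by simp [Wf]
    have h2 : Wf r 0 (k + 1) = [] := by simp [Wf]
    simp [h1, h2]
  · have hlen : k - c < (r.take k).length := by simp; omega
    have hd1 : Wf r c k = r[k - c]'(by omega) :: (r.take k).drop (k - c + 1) := by
      unfold Wf
      rw [List.drop_eq_getElem_cons hlen, List.getElem_take]
    have hd2 : Wf r c (k + 1) = (r.take k).drop (k - c + 1) ++ [r[k]] := by
      unfold Wf
      rw [List.take_succ_eq_append_getElem hk, List.drop_append_of_le_length (by simp; omega)]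
      congr 2
      omega
    rw [hd1, hd2, ← List.cons_append]
    exact List.perm_append_singleton _ _

lemma length_Wf (r : List Int) (c k : Nat) (hk : k ≤ r.length) : (Wf r c k).length = k - (k - c) := by
  simp [Wf]; omega

lemma slice_eq_Wf (r : List Int) (w : Int) (k : Nat) :
    PySem.List.slice r (some (max 0 ((k : Int) - w + 1))) (some ((k : Int) + 1))
      = Wf r (max w 0).toNat (k + 1) := by
  have ha : (0 : Int) ≤ max 0 ((k : Int) - w + 1) := le_max_left _ _
  rw [PySem.List.slice_toNat r ha (by omega)]
  unfold Wf
  rw [List.drop_take]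
  rcases le_total w 0 with hw | hw
  · -- empty window on both sides
    rw [max_eq_right hw, max_eq_right (by omega : (0 : Int) ≤ (k : Int) - w + 1)]
    have h1 : ((k : Int) + 1).toNat - ((k : Int) - w + 1).toNat = 0 := by omega
    have h2 : k + 1 - (k + 1 - (0 : Int).toNat) = 0 := by omega
    rw [h1, h2]
    simp
  · rw [max_eq_left hw]
    have e0 : ((k : Int) + 1).toNat = k + 1 := by omega
    have e1 : (max 0 ((k : Int) - w + 1)).toNat = k + 1 - w.toNat := by
      rcases le_total ((k : Int) - w + 1) 0 with hx | hx
      · rw [max_eq_left hx]; omega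
      · rw [max_eq_right hx]; omega
    rw [e0, e1]

lemma bval_eq (r : List Int) (w : Int) (k : Nat) (win : List Int)
    (hwin : win = PySem.List.sorted (Wf r (max w 0).toNat (k + 1)) (fun x => x)) :
    (if ((win.length : Int) < 5) then (0 : Int)
     else -(PySem.List.pyGetD win (PySem.Int.floordiv (win.length : Int) 20) 0)) = avalI r w (k : Int) := by
  subst hwin
  unfold avalI
  rw [slice_eq_Wf r w k]
  have hlen : (PySem.List.sorted (Wf r (max w 0).toNat (k + 1)) (fun x => x)).length
      = (Wf r (max w 0).toNat (k + 1)).length := PySem.List.length_sorted _ _ _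
  by_cases h5 : (Wf r (max w 0).toNat (k + 1)).length < 5
  · rw [if_pos (by rw [hlen]; exact_mod_cast h5), if_pos h5]
  · rw [if_neg (by rw [hlen]; exact_mod_cast h5), if_neg h5]

lemma bStep_correct (r : List Int) (w : Int) (k : Nat) (hk : k < r.length) (win out : List Int)
    (hwin : win = PySem.List.sorted (Wf r (max w 0).toNat k) (fun x => x)) :
    bStep r (max w 0) (win, out) ((k : Int), r[k])
      = (PySem.List.sorted (Wf r (max w 0).toNat (k + 1)) (fun x => x), out ++ [avalI r w (k : Int)]) := by
  subst hwin
  have hc : ((max w 0).toNat : Int) = max w 0 := Int.toNat_of_nonneg (le_max_right _ _)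
  set c := (max w 0).toNat with hcdef
  have hkle : k ≤ r.length := le_of_lt hk
  have hsort_pw : (PySem.List.sorted (Wf r c k) (fun x => x)).Pairwise (· ≤ ·) :=
    PySem.List.sorted_pairwise _ _
  have hperm : (PySem.List.sorted (Wf r c k) (fun x => x)).Perm (Wf r c k) :=
    PySem.List.sorted_perm _ _ _
  obtain ⟨hins_pw, hins_perm⟩ :=
    insert_at_insertPos (PySem.List.sorted (Wf r c k) (fun x => x)) r[k] hsort_pw
  simp only [bStep]
  set win0 := PySem.List.insert (PySem.List.sorted (Wf r c k) (fun x => x))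
    (insertPos (PySem.List.sorted (Wf r c k) (fun x => x)) r[k] 0
      ((PySem.List.sorted (Wf r c k) (fun x => x)).length : Int)) r[k] with hw0
  have hlenWf : (Wf r c k).length = k - (k - c) := length_Wf r c k hkle
  have hlen0 : win0.length = (k - (k - c)) + 1 := by
    rw [hins_perm.length_eq, List.length_cons, hperm.length_eq, hlenWf]
  have hwinperm : win0.Perm (r[k] :: Wf r c k) := hins_perm.trans (List.Perm.cons _ hperm)
  by_cases hcase : c ≤ k
  · have hcond : max w 0 < (win0.length : Int) := by rw [← hc]; push_cast [hlen0]; omega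
    rw [if_pos hcond]
    have hkc : k - c < r.length := by omega
    have hold : PySem.List.pyGetD r ((k : Int) - max w 0) 0 = r[k - c] := by
      have hidx : (k : Int) - max w 0 = ((k - c : Nat) : Int) := by rw [← hc]; omega
      rw [hidx, PySem.List.pyGetD_eq_getElem r 0 (by omega) (by exact_mod_cast hkc)]
      simp
    rw [hold]
    have holdmem : r[k - c] ∈ win0 :=
      hwinperm.mem_iff.mpr ((Wf_succ_perm_ge r c k hk hcase).subset List.mem_cons_self)
    obtain ⟨res, hpop, hres_pw, hres_perm⟩ := pop_at_insertPos win0 r[k - c] hins_pw holdmem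
    rw [hpop]
    have hres_perm2 : res.Perm (Wf r c (k + 1)) :=
      ((hres_perm.trans hwinperm).trans (Wf_succ_perm_ge r c k hk hcase).symm).cons_inv
    have hres_eq : PySem.List.sorted (Wf r c (k + 1)) (fun x => x) = res :=
      PySem.List.sorted_id_eq_of_perm_of_pairwise _ _ hres_perm2 hres_pw
    rw [← hres_eq]
    exact Prod.ext rfl (by rw [bval_eq r w k _ rfl])
  · have hcond : ¬ (max w 0 < (win0.length : Int)) := by rw [← hc]; push_cast [hlen0]; omega
    rw [if_neg hcond]
    have hperm1 : win0.Perm (Wf r c (k + 1)) := by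
      rw [Wf_succ_lt r c k hk (by omega)]
      exact hwinperm.trans (List.perm_append_singleton _ _).symm
    have heq : PySem.List.sorted (Wf r c (k + 1)) (fun x => x) = win0 :=
      PySem.List.sorted_id_eq_of_perm_of_pairwise _ _ hperm1 hins_pw
    rw [← heq]
    exact Prod.ext rfl (by rw [bval_eq r w k _ rfl])

lemma bfold_inv (r : List Int) (w : Int) (k : Nat) (hk : k ≤ r.length) :
    (PySem.List.enumerate (r.take k)).foldl (bStep r (max w 0)) ([], [])
      = (PySem.List.sorted (Wf r (max w 0).toNat k) (fun x => x),
         (List.range k).map (fun j : Nat => avalI r w (j : Int))) := by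
  induction k with
  | zero =>
    have hWf : Wf r (max w 0).toNat 0 = [] := by simp [Wf]
    simp [PySem.List.enumerate_nil, hWf, PySem.List.sorted_eq_nil_iff]
  | succ k ih =>
    have hk' : k < r.length := by omega
    rw [List.take_succ_eq_append_getElem hk', PySem.List.enumerate_append, List.foldl_append,
      ih (by omega)]
    have hlen : (r.take k).length = k := by simp; omega
    rw [hlen, PySem.List.enumerate_cons, PySem.List.enumerate_nil]
    simp only [List.foldl_cons, List.foldl_nil, zero_add]
    rw [bStep_correct r w k hk' _ _ rfl, List.range_succ, List.map_append]
    rfl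

-- ===== VERDICT (by name: the statement is the Claim_ definition above) =====
theorem calculate_rolling_var_spec : Claim_equal_calculate_rolling_var := by
  intro returns window_size _
  unfold Spec_calculate_rolling_var calculate_rolling_var calculate_rolling_var_alt
  have hb := bfold_inv returns window_size returns.length (le_refl _)
  rw [List.take_length] at hb
  simp only [hb, afold_eq]
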